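-- pv_equiv track=rewrite | github.com/anirudhprabhakaran3/sodc-assignment | boolalg/rules/rules.py | identity_and
-- ===== SOURCE A (Python) =====
-- def identity_and(s):
--     """
--         Input: List of cubes
--         Output: List of cubes after applying aA = 0
--     """
--     new_cube_list = []
--     for cube in s:
--         flag = True
--         if cube == "0" or cube == "1":
--             new_cube_list.append(cube)
--             continue
--         for i in cube:
--             if i.lower() in cube and i.upper() in cube:
--                 flag = False
--                 continue
--         if flag:
--             new_cube_list.append(cube)
--
--     if len(new_cube_list) > 0:
--         return new_cube_list
--     else:
--         return ["0"]
-- ===== SOURCE B (Python) =====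
-- def identity_and(s):
--     """
--         Input: List of cubes
--         Output: List of cubes after applying aA = 0
--     """
--     new_cube_list = []
--     for cube in s:
--         if cube == "0" or cube == "1":
--             new_cube_list.append(cube)
--             continue
--         # a cube survives iff all its characters are letters and no letter
--         # collapses with another under lower(): then no variable appears in both cases
--         if all(c.isalpha() for c in cube) and len({c.lower() for c in cube}) == len(set(cube)):
--             new_cube_list.append(cube)
--     return new_cube_list or ["0"]
-- ===== Notes on version B (the rewrite author's own statement) =====
-- stated objective: simpler
-- what changed: The inner per-character scan doing two membership tests per character is replaced by a single set-cardinality conflict test: a cube is kept iff all its characters are letters and lowering its character set loses no elements (len({c.lower() for c in cube}) == len(set(cube))).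
import Mathlib
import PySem

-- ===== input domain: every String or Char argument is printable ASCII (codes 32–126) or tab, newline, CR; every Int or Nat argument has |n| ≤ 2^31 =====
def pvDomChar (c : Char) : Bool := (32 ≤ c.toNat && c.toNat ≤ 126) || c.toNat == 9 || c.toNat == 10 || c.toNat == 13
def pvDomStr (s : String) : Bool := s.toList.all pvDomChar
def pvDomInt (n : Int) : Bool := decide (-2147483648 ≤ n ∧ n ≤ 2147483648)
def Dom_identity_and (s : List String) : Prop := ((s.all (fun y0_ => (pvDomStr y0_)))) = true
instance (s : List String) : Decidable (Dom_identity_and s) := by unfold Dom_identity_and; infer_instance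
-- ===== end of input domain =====

-- B replaces A's per-character double membership scan by a set-cardinality collapse test
-- (all characters letters, and lowering the cube's character set loses no elements): simpler, same result.

-- ===== PORT A =====
def identity_and (s : List String) : List String :=
  let ncl := s.foldl (fun acc cube =>
    if cube == "0" || cube == "1" then acc ++ [cube]
    else
      let flag := cube.toList.foldl (fun flag i =>
        if PySem.Chars.isIn (PySem.Chars.lower [i]) cube.toList &&
           PySem.Chars.isIn (PySem.Chars.upper [i]) cube.toList then false else flag) true
      if flag then acc ++ [cube] else acc) []
  if ncl.length > 0 then ncl else ["0"]

-- ===== PORT B =====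
-- 'all(c.isalpha() for c in cube) and len({c.lower() for c in cube}) == len(set(cube))'
def pvNoConflict (cs : List Char) : Bool :=
  cs.all PySem.Chars.isalpha &&
  ((PySem.Set.ofList (cs.map PySem.Chars.lowerChar)).length == (PySem.Set.ofList cs).length)

def identity_and_alt (s : List String) : List String :=
  let ncl := s.foldl (fun acc cube =>
    if cube == "0" || cube == "1" then acc ++ [cube]
    else if pvNoConflict cube.toList then acc ++ [cube] else acc) []
  if ncl = [] then ["0"] else ncl

-- ===== PRECONDITION & SPEC =====
def Spec_identity_and (s : List String) (out : List String) : Prop := out = identity_and_alt s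
instance (s : List String) (out : List String) : Decidable (Spec_identity_and s out) := by unfold Spec_identity_and; infer_instance

-- ===== CLAIM (what is proved, stated in full; the proofs are below) =====
def Claim_equal_identity_and : Prop := ∀ (s : List String), Dom_identity_and s → Spec_identity_and s (identity_and s)

-- ===== LEMMAS AND PROOFS =====

theorem pv_char_eq_iff (a b : Char) : a = b ↔ a.toNat = b.toNat := by
  constructor
  · intro h; rw [h]
  · intro h; exact Char.ext (UInt32.toNat_inj.mp h)

theorem pv_isupper_iff (c : Char) : PySem.Chars.isupper c = true ↔ (65 ≤ c.toNat ∧ c.toNat ≤ 90) := by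
  unfold PySem.Chars.isupper
  constructor
  · intro h; simp at h; exact ⟨h.1, h.2⟩
  · intro h; simp; exact ⟨h.1, h.2⟩

theorem pv_islower_iff (c : Char) : PySem.Chars.islower c = true ↔ (97 ≤ c.toNat ∧ c.toNat ≤ 122) := by
  unfold PySem.Chars.islower
  constructor
  · intro h; simp at h; exact ⟨h.1, h.2⟩
  · intro h; simp; exact ⟨h.1, h.2⟩

theorem pv_lower_toNat (c : Char) (h : PySem.Chars.isupper c = true) :
    (PySem.Chars.lowerChar c).toNat = c.toNat + 32 := by
  unfold PySem.Chars.lowerChar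
  rw [if_pos h, Char.toNat_ofNat, if_pos]
  have := (pv_isupper_iff c).mp h
  exact Or.inl (by omega)

theorem pv_upper_toNat (c : Char) (h : PySem.Chars.islower c = true) :
    (PySem.Chars.upperChar c).toNat = c.toNat - 32 := by
  unfold PySem.Chars.upperChar
  rw [if_pos h, Char.toNat_ofNat, if_pos]
  have := (pv_islower_iff c).mp h
  exact Or.inl (by omega)

theorem pv_not_alpha_fix (c : Char) (h : PySem.Chars.isalpha c = false) :
    PySem.Chars.lowerChar c = c ∧ PySem.Chars.upperChar c = c := by
  unfold PySem.Chars.isalpha at h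
  simp only [Bool.or_eq_false_iff] at h
  unfold PySem.Chars.lowerChar PySem.Chars.upperChar
  rw [if_neg (by simp [h.1]), if_neg (by simp [h.2])]
  exact ⟨rfl, rfl⟩

theorem pv_alpha_toNat (c : Char) (h : PySem.Chars.isalpha c = true) :
    (65 ≤ c.toNat ∧ c.toNat ≤ 90 ∧ (PySem.Chars.lowerChar c).toNat = c.toNat + 32 ∧ PySem.Chars.upperChar c = c)
    ∨ (97 ≤ c.toNat ∧ c.toNat ≤ 122 ∧ PySem.Chars.lowerChar c = c ∧ (PySem.Chars.upperChar c).toNat = c.toNat - 32) := by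
  unfold PySem.Chars.isalpha at h
  rcases Bool.or_eq_true_iff.mp h with hu | hl
  · have hr := (pv_isupper_iff c).mp hu
    have hnl : PySem.Chars.islower c = false := by
      by_contra hx
      have := (pv_islower_iff c).mp (by revert hx; cases PySem.Chars.islower c <;> simp)
      omega
    refine Or.inl ⟨hr.1, hr.2, pv_lower_toNat c hu, ?_⟩
    unfold PySem.Chars.upperChar; rw [if_neg (by simp [hnl])]
  · have hr := (pv_islower_iff c).mp hl
    have hnu : PySem.Chars.isupper c = false := by
      by_contra hx
      have := (pv_isupper_iff c).mp (by revert hx; cases PySem.Chars.isupper c <;> simp)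
      omega
    refine Or.inr ⟨hr.1, hr.2, ?_, pv_upper_toNat c hl⟩
    unfold PySem.Chars.lowerChar; rw [if_neg (by simp [hnu])]

theorem pv_isupper_of_range (c : Char) (h1 : 65 ≤ c.toNat) (h2 : c.toNat ≤ 90) :
    PySem.Chars.isupper c = true := (pv_isupper_iff c).mpr ⟨h1, h2⟩

theorem pv_islower_of_range (c : Char) (h1 : 97 ≤ c.toNat) (h2 : c.toNat ≤ 122) :
    PySem.Chars.islower c = true := (pv_islower_iff c).mpr ⟨h1, h2⟩

-- an alpha character conflicts with its own case pair: lowering both cases gives the same letter,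
-- and the two cases are distinct characters
theorem pv_alpha_conflict (c : Char) (h : PySem.Chars.isalpha c = true) :
    PySem.Chars.lowerChar (PySem.Chars.lowerChar c) = PySem.Chars.lowerChar c
    ∧ PySem.Chars.lowerChar (PySem.Chars.upperChar c) = PySem.Chars.lowerChar c
    ∧ PySem.Chars.lowerChar c ≠ PySem.Chars.upperChar c := by
  rcases pv_alpha_toNat c h with ⟨h1, h2, hlo, hup⟩ | ⟨h1, h2, hlo, hup⟩
  · have hll : PySem.Chars.islower (PySem.Chars.lowerChar c) = true :=
      pv_islower_of_range _ (by omega) (by omega)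
    have hlf := pv_alpha_toNat (PySem.Chars.lowerChar c) (by unfold PySem.Chars.isalpha; simp [hll])
    rcases hlf with ⟨g1, g2, _, _⟩ | ⟨_, _, g3, _⟩
    · omega
    · refine ⟨g3, by rw [hup], ?_⟩
      rw [hup]; intro hx
      have := congrArg Char.toNat hx; omega
  · have hlu : PySem.Chars.isupper (PySem.Chars.upperChar c) = true :=
      pv_isupper_of_range _ (by omega) (by omega)
    have := pv_lower_toNat _ hlu
    refine ⟨by simp [hlo], ?_, ?_⟩
    · rw [hlo, pv_char_eq_iff]; omega
    · rw [hlo]; intro hx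
      have := congrArg Char.toNat hx; omega

-- two distinct alpha characters with the same lowering are exactly a case pair
theorem pv_alpha_collapse (a b : Char) (ha : PySem.Chars.isalpha a = true)
    (hb : PySem.Chars.isalpha b = true) (hl : PySem.Chars.lowerChar a = PySem.Chars.lowerChar b)
    (hne : a ≠ b) :
    (PySem.Chars.lowerChar a = a ∧ PySem.Chars.upperChar a = b)
    ∨ (PySem.Chars.lowerChar a = b ∧ PySem.Chars.upperChar a = a) := by
  have hl' : (PySem.Chars.lowerChar a).toNat = (PySem.Chars.lowerChar b).toNat := by rw [hl]
  have hne' : a.toNat ≠ b.toNat := fun h => hne ((pv_char_eq_iff a b).mpr h)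
  rcases pv_alpha_toNat a ha with ⟨a1, a2, alo, aup⟩ | ⟨a1, a2, alo, aup⟩ <;>
    rcases pv_alpha_toNat b hb with ⟨b1, b2, blo, bup⟩ | ⟨b1, b2, blo, bup⟩
  · have : (PySem.Chars.lowerChar b).toNat = b.toNat + 32 := blo
    omega
  · refine Or.inr ⟨?_, aup⟩
    rw [pv_char_eq_iff]
    have : (PySem.Chars.lowerChar b).toNat = b.toNat := by rw [blo]
    omega
  · refine Or.inl ⟨alo, ?_⟩
    rw [pv_char_eq_iff]
    have h3 : (PySem.Chars.lowerChar a).toNat = a.toNat := by rw [alo]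
    omega
  · have h3 : (PySem.Chars.lowerChar a).toNat = a.toNat := by rw [alo]
    have h4 : (PySem.Chars.lowerChar b).toNat = b.toNat := by rw [blo]
    omega

theorem pv_isIn_single (a : Char) (l : List Char) : PySem.Chars.isIn [a] l = true ↔ a ∈ l := by
  rw [PySem.Chars.isIn_iff_infix]; exact List.singleton_infix_iff a l

theorem pv_set_len (l : List Char) : (PySem.Set.ofList l).length = l.toFinset.card := by
  have he : (PySem.Set.ofList l).toFinset = l.toFinset := by
    ext x; simp [PySem.Set.mem_ofList]
  rw [← List.toFinset_card_of_nodup (PySem.Set.nodup_ofList l), he]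

theorem pv_len_iff (cs : List Char) :
    ((PySem.Set.ofList (cs.map PySem.Chars.lowerChar)).length = (PySem.Set.ofList cs).length)
    ↔ Set.InjOn PySem.Chars.lowerChar {x | x ∈ cs} := by
  rw [pv_set_len, pv_set_len]
  have he : (cs.map PySem.Chars.lowerChar).toFinset = cs.toFinset.image PySem.Chars.lowerChar := by
    ext x; simp
  rw [he, Finset.card_image_iff, List.coe_toFinset]

-- the two per-cube keep decisions agree
theorem pv_keep_eq (cs : List Char) :
    (!cs.any (fun i => PySem.Chars.isIn [PySem.Chars.lowerChar i] cs &&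
                       PySem.Chars.isIn [PySem.Chars.upperChar i] cs)) = pvNoConflict cs := by
  rw [Bool.eq_iff_iff]
  have hA : (!cs.any (fun i => PySem.Chars.isIn [PySem.Chars.lowerChar i] cs &&
                       PySem.Chars.isIn [PySem.Chars.upperChar i] cs)) = true
      ↔ ¬ ∃ i ∈ cs, PySem.Chars.lowerChar i ∈ cs ∧ PySem.Chars.upperChar i ∈ cs := by
    simp [pv_isIn_single]
  have hB : pvNoConflict cs = true
      ↔ (∀ c ∈ cs, PySem.Chars.isalpha c = true) ∧
        Set.InjOn PySem.Chars.lowerChar {x | x ∈ cs} := by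
    simp [pvNoConflict, List.all_eq_true, pv_len_iff]
  rw [hA, hB]
  constructor
  · intro h
    have hall : ∀ c ∈ cs, PySem.Chars.isalpha c = true := by
      intro c hc
      by_contra hx
      have hxf : PySem.Chars.isalpha c = false := by
        revert hx; cases PySem.Chars.isalpha c <;> simp
      have hfix := pv_not_alpha_fix c hxf
      exact h ⟨c, hc, by rw [hfix.1]; exact hc, by rw [hfix.2]; exact hc⟩
    refine ⟨hall, ?_⟩
    intro a ha b hb hab
    by_contra hne
    rcases pv_alpha_collapse a b (hall a ha) (hall b hb) hab hne with ⟨h1, h2⟩ | ⟨h1, h2⟩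
    · exact h ⟨a, ha, by rw [h1]; exact ha, by rw [h2]; exact hb⟩
    · exact h ⟨a, ha, by rw [h1]; exact hb, by rw [h2]; exact ha⟩
  · rintro ⟨hall, hinj⟩ ⟨i, hi, hlo, hup⟩
    have ⟨c1, c2, c3⟩ := pv_alpha_conflict i (hall i hi)
    exact c3 (hinj hlo hup (by rw [c1, c2]))

-- ===== VERDICT (by name: the statement is the Claim_ definition above) =====
theorem identity_and_spec : Claim_equal_identity_and := by
  intro s _
  unfold Spec_identity_and identity_and identity_and_alt
  have hfold : ∀ (init : List String),
      s.foldl (fun acc cube =>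
        if cube == "0" || cube == "1" then acc ++ [cube]
        else
          let flag := cube.toList.foldl (fun flag i =>
            if PySem.Chars.isIn (PySem.Chars.lower [i]) cube.toList &&
               PySem.Chars.isIn (PySem.Chars.upper [i]) cube.toList then false else flag) true
          if flag then acc ++ [cube] else acc) init
      = s.foldl (fun acc cube =>
        if cube == "0" || cube == "1" then acc ++ [cube]
        else if pvNoConflict cube.toList then acc ++ [cube] else acc) init := by
    intro init
    apply PySem.List.foldl_congr_mem
    intro acc cube _
    by_cases h01 : (cube == "0" || cube == "1") = true
    · simp [h01]
    · simp only [Bool.not_eq_true] at h01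
      simp only [h01, Bool.false_eq_true, if_false]
      rw [show (fun (flag : Bool) (i : Char) =>
            if PySem.Chars.isIn (PySem.Chars.lower [i]) cube.toList &&
               PySem.Chars.isIn (PySem.Chars.upper [i]) cube.toList then false else flag)
          = (fun (flag : Bool) (i : Char) =>
            if PySem.Chars.isIn [PySem.Chars.lowerChar i] cube.toList &&
               PySem.Chars.isIn [PySem.Chars.upperChar i] cube.toList then false else flag) from by
            funext flag i; simp [PySem.Chars.lower, PySem.Chars.upper]]
      rw [PySem.List.foldl_if_false_eq, Bool.true_and, pv_keep_eq]
  rw [hfold]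
  cases s.foldl (fun acc cube =>
        if cube == "0" || cube == "1" then acc ++ [cube]
        else if pvNoConflict cube.toList then acc ++ [cube] else acc) [] <;> simp
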